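-- pv_equiv track=rewrite | github.com/pranayab18/Data_Extraction | src/cleaners/table_cleaners.py | _looks_like_disclaimer
-- ===== SOURCE A (Python) =====
-- def _looks_like_disclaimer(text: str) -> bool:
--     """Check if text looks like disclaimer content."""
--     if not isinstance(text, str):
--         return False
--
--     text_lower = text.lower()
--     disclaimer_keywords = [
--         "confidential",
--         "disclaimer",
--         "unauthorized",
--         "intended recipient",
--         "caution",
--     ]
--
--     return any(keyword in text_lower for keyword in disclaimer_keywords)
-- ===== SOURCE B (Python) =====
-- def _looks_like_disclaimer(text: str) -> bool:
--     """Check if text looks like disclaimer content (single left-to-right scan)."""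
--     if not isinstance(text, str):
--         return False
--     keywords = ("confidential", "disclaimer", "unauthorized",
--                 "intended recipient", "caution")
--     t = text.lower()
--     for i in range(len(t)):
--         if any(t.startswith(k, i) for k in keywords):
--             return True
--     return False
-- ===== Notes on version B (the rewrite author's own statement) =====
-- stated objective: alternative
-- what changed: Replaces five independent whole-string substring scans, one per keyword, with a single left-to-right pass that at each position checks whether some keyword starts there via startswith.
import Mathlib
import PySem

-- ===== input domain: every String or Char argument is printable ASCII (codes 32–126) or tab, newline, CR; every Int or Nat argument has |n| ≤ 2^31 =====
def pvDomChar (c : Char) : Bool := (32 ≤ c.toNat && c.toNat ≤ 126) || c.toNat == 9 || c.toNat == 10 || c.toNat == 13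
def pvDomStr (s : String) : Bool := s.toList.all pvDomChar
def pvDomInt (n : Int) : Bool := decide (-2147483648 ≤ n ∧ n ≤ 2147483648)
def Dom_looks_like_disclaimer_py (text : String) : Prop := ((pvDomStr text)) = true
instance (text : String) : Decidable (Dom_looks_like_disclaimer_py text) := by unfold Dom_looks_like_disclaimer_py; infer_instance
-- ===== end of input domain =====

-- B replaces A's five independent substring scans with one left-to-right pass that at each
-- position checks whether some keyword starts there; equal return value on all inputs.

def pvKeywords : List String :=
  ["confidential", "disclaimer", "unauthorized", "intended recipient", "caution"]

-- ===== PORT A =====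
-- A: lower the text, then any(keyword in text_lower for keyword in keywords)
def looks_like_disclaimer_py (text : String) : Bool :=
  let text_lower := PySem.Str.lower text
  pvKeywords.any (fun keyword => PySem.Str.isIn keyword text_lower)

-- ===== PORT B =====
-- B's scan loop: for each suffix position, does some keyword start here?
def pvScan (kws : List (List Char)) : List Char → Bool
  | [] => false
  | c :: rest => kws.any (fun k => k.isPrefixOf (c :: rest)) || pvScan kws rest

def looks_like_disclaimer_py_alt (text : String) : Bool :=
  pvScan (pvKeywords.map String.toList) (PySem.Str.lower text).toList

-- ===== PRECONDITION & SPEC =====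
def Spec_looks_like_disclaimer_py (text : String) (out : Bool) : Prop := out = looks_like_disclaimer_py_alt text
instance (text : String) (out : Bool) : Decidable (Spec_looks_like_disclaimer_py text out) := by unfold Spec_looks_like_disclaimer_py; infer_instance

-- ===== CLAIM (what is proved, stated in full; the proofs are below) =====
def Claim_equal_looks_like_disclaimer_py : Prop := ∀ (text : String), Dom_looks_like_disclaimer_py text → Spec_looks_like_disclaimer_py text (looks_like_disclaimer_py text)

-- ===== LEMMAS AND PROOFS =====

-- The scan finds a keyword iff some keyword is an infix, provided all keywords are nonempty.
theorem pvScan_eq_any_infix (kws : List (List Char)) (h : ∀ k ∈ kws, k ≠ []) :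
    ∀ l : List Char, pvScan kws l = kws.any (fun k => decide (k <:+: l)) := by
  intro l
  induction l with
  | nil =>
    simp only [pvScan]
    symm
    rw [List.any_eq_false]
    intro k hk
    simp only [List.infix_nil]
    simpa using h k hk
  | cons c rest ih =>
    simp only [pvScan, ih]
    rw [Bool.eq_iff_iff]
    simp only [Bool.or_eq_true, List.any_eq_true, decide_eq_true_eq,
      List.isPrefixOf_iff_prefix, List.infix_cons_iff]
    constructor
    · rintro (⟨k, hk, hp⟩ | ⟨k, hk, hi⟩)
      · exact ⟨k, hk, Or.inl hp⟩
      · exact ⟨k, hk, Or.inr hi⟩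
    · rintro ⟨k, hk, hp | hi⟩
      · exact Or.inl ⟨k, hk, hp⟩
      · exact Or.inr ⟨k, hk, hi⟩

theorem looks_like_disclaimer_py_spec : Claim_equal_looks_like_disclaimer_py := by
  intro text _
  unfold Spec_looks_like_disclaimer_py looks_like_disclaimer_py looks_like_disclaimer_py_alt
  rw [pvScan_eq_any_infix _ (by decide), List.any_map]
  simp only [Function.comp_def]
  congr 1
  funext k
  exact Bool.eq_iff_iff.mpr (by simp [PySem.Chars.isIn_iff_infix])
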